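-- pv_equiv track=rewrite | github.com/bxparks/tzplus | tools/check_data.py | get_poly_timezones
-- ===== SOURCE A (Python) =====
-- from typing import Dict
-- from typing import List
--
-- CountryTimezones = Dict[str, List[str]]
--
-- def get_poly_timezones(
--     country_timezones: CountryTimezones,
-- ) -> Dict[str, List[str]]:
--     """Return the timezones that belong to multiple countries."""
--     timezone_countries: Dict[str, List[str]] = {}  # timezone -> [countries]
--     for country, timezones in country_timezones.items():
--         for z in timezones:
--             countries = timezone_countries.get(z)
--             if not countries:
--                 countries = []
--                 timezone_countries[z] = countries
--             countries.append(country)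
--     poly_timezones = {
--         k: v
--         for k, v in timezone_countries.items()
--         if len(v) > 1
--     }
--     return poly_timezones
-- ===== SOURCE B (Python) =====
-- from typing import Dict
-- from typing import List
--
-- CountryTimezones = Dict[str, List[str]]
--
--
-- def get_poly_timezones(
--     country_timezones: CountryTimezones,
-- ) -> Dict[str, List[str]]:
--     """Return the timezones that belong to multiple countries.
--
--     Two passes: first count how many times each zone occurs across all
--     country lists, then rebuild only zones whose count exceeds one.
--     """
--     counts: Dict[str, int] = {}
--     for timezones in country_timezones.values():
--         for z in timezones:
--             counts[z] = counts.get(z, 0) + 1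
--     poly_timezones: Dict[str, List[str]] = {}
--     for country, timezones in country_timezones.items():
--         for z in timezones:
--             if counts[z] > 1:
--                 poly_timezones.setdefault(z, []).append(country)
--     return poly_timezones
-- ===== Notes on version B (the rewrite author's own statement) =====
-- stated objective: alternative
-- what changed: A builds the full timezone->countries map in one pass and then filters it by list length; B makes a counting pass first (occurrences per zone) and a second pass that only ever inserts zones whose total count exceeds one, so the full map is never materialised.
import Mathlib
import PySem

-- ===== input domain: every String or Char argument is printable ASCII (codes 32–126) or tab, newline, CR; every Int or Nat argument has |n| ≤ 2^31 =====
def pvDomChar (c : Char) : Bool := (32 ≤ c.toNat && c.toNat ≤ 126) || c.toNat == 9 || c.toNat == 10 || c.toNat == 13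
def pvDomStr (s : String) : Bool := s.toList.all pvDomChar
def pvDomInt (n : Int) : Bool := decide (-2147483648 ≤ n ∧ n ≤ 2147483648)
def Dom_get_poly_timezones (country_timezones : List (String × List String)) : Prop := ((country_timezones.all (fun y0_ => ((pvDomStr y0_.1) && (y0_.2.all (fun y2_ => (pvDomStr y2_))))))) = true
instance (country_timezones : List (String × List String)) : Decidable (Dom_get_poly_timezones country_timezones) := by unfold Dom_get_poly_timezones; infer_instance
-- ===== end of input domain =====

-- B changes the decomposition: a counting pass first, then building only zones with count > 1 (no speed claim).

-- ===== PORT A =====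
-- inner loop 'for z in timezones': countries = tc.get(z); 'if not countries' fires on None or [],
-- and in every branch the dict ends up holding the old list (possibly []) with country appended,
-- at the key's existing position (Dict.insert overwrites in place) — exact.
def pvTCInner (country : String) (tc : PySem.Dict String (List String)) (zs : List String) :
    PySem.Dict String (List String) :=
  zs.foldl (fun tc z => tc.insert z (tc.getD z [] ++ [country])) tc

def get_poly_timezones (country_timezones : List (String × List String)) : List (String × List String) :=
  let timezone_countries :=
    country_timezones.foldl (fun tc p => pvTCInner p.1 tc p.2) PySem.Dict.empty
  timezone_countries.items.filter (fun kv => decide (1 < kv.2.length))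

-- ===== PORT B =====
def pvCountsInner (c : PySem.Dict String Int) (zs : List String) : PySem.Dict String Int :=
  zs.foldl (fun c z => c.insert z (c.getD z 0 + 1)) c

-- counts[z]: the key always exists here (it was counted in the first pass), so getD 0 is exact
def pvPolyInner (counts : PySem.Dict String Int) (country : String)
    (r : PySem.Dict String (List String)) (zs : List String) : PySem.Dict String (List String) :=
  zs.foldl (fun r z => if 1 < counts.getD z 0 then r.insert z (r.getD z [] ++ [country]) else r) r

def get_poly_timezones_alt (country_timezones : List (String × List String)) : List (String × List String) :=
  let counts := country_timezones.foldl (fun c p => pvCountsInner c p.2) PySem.Dict.empty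
  let poly :=
    country_timezones.foldl (fun r p => pvPolyInner counts p.1 r p.2) PySem.Dict.empty
  poly.items

-- ===== PRECONDITION & SPEC =====
def Spec_get_poly_timezones (country_timezones : List (String × List String)) (out : List (String × List String)) : Prop := out = get_poly_timezones_alt country_timezones
instance (country_timezones : List (String × List String)) (out : List (String × List String)) : Decidable (Spec_get_poly_timezones country_timezones out) := by unfold Spec_get_poly_timezones; infer_instance

-- ===== CLAIM (what is proved, stated in full; the proofs are below) =====
def Claim_equal_get_poly_timezones : Prop := ∀ (country_timezones : List (String × List String)), Dom_get_poly_timezones country_timezones → Spec_get_poly_timezones country_timezones (get_poly_timezones country_timezones)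

-- ===== LEMMAS AND PROOFS =====

-- the filtered view of a dict: keep the pairs whose key passes p
def pvFD (p : String → Bool) (d : PySem.Dict String (List String)) : PySem.Dict String (List String) :=
  ⟨d.items.filter (fun kv => p kv.1)⟩

theorem pv_find_filter_key (p : String → Bool) (z : String) (hz : p z = true)
    (l : List (String × List String)) :
    (l.filter (fun kv => p kv.1)).find? (fun kv => kv.1 == z) = l.find? (fun kv => kv.1 == z) := by
  induction l with
  | nil => rfl
  | cons kv t ih =>
    by_cases hk : kv.1 = z
    · simp [List.find?, hk, hz]
    · have hbe : (kv.1 == z) = false := by simp [hk]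
      cases hp : p kv.1 <;> simp [List.find?, hbe, hp, ih]

theorem pvFD_get? (p : String → Bool) (z : String) (hz : p z = true)
    (d : PySem.Dict String (List String)) : (pvFD p d).get? z = d.get? z := by
  simp [PySem.Dict.get?, pvFD, pv_find_filter_key p z hz]

theorem pvFD_contains (p : String → Bool) (z : String) (hz : p z = true)
    (d : PySem.Dict String (List String)) : (pvFD p d).contains z = d.contains z := by
  rw [PySem.Dict.contains_eq_isSome_get?, PySem.Dict.contains_eq_isSome_get?, pvFD_get? p z hz]

theorem pvFD_insert_pos (p : String → Bool) (z : String) (hz : p z = true)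
    (d : PySem.Dict String (List String)) (v : List String) :
    pvFD p (d.insert z v) = (pvFD p d).insert z v := by
  have hmap : ∀ l : List (String × List String),
      (l.map (fun q => if q.1 == z then (z, v) else q)).filter (fun kv => p kv.1)
        = (l.filter (fun kv => p kv.1)).map (fun q => if q.1 == z then (z, v) else q) := by
    intro l
    induction l with
    | nil => rfl
    | cons kv t ih =>
      simp only [beq_iff_eq] at ih
      by_cases hk : kv.1 = z
      · simp [hk, hz, ih]
      · cases hp : p kv.1 <;> simp [hk, hp, ih]
  simp only [beq_iff_eq] at hmap
  simp only [PySem.Dict.insert, pvFD_contains p z hz]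
  cases hc : d.contains z <;> simp [pvFD, List.filter_append, hz, hmap]

theorem pvFD_insert_neg (p : String → Bool) (z : String) (hz : p z = false)
    (d : PySem.Dict String (List String)) (v : List String) :
    pvFD p (d.insert z v) = pvFD p d := by
  have hmap : ∀ l : List (String × List String),
      (l.map (fun q => if q.1 == z then (z, v) else q)).filter (fun kv => p kv.1)
        = l.filter (fun kv => p kv.1) := by
    intro l
    induction l with
    | nil => rfl
    | cons kv t ih =>
      simp only [beq_iff_eq] at ih
      by_cases hk : kv.1 = z
      · simp [hk, hz, ih]
      · cases hp : p kv.1 <;> simp [hk, hp, ih]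
  simp only [beq_iff_eq] at hmap
  simp only [PySem.Dict.insert]
  cases hc : d.contains z <;> simp [pvFD, List.filter_append, hz, hmap]

-- Bool-predicate form of B's inner loop
def pvPolyB (p : String → Bool) (country : String) (r : PySem.Dict String (List String))
    (zs : List String) : PySem.Dict String (List String) :=
  zs.foldl (fun r z => if p z then r.insert z (r.getD z [] ++ [country]) else r) r

theorem pvPolyInner_eq_pvPolyB (counts : PySem.Dict String Int) (country : String)
    (r : PySem.Dict String (List String)) (zs : List String) :
    pvPolyInner counts country r zs
      = pvPolyB (fun z => decide (1 < counts.getD z 0)) country r zs := by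
  unfold pvPolyInner pvPolyB
  congr 1
  funext r z
  by_cases h : 1 < counts.getD z 0 <;> simp [h]

theorem pv_inner_comm (p : String → Bool) (c : String) (zs : List String)
    (tc : PySem.Dict String (List String)) :
    pvPolyB p c (pvFD p tc) zs = pvFD p (pvTCInner c tc zs) := by
  induction zs generalizing tc with
  | nil => rfl
  | cons z zs ih =>
    simp only [pvPolyB, pvTCInner, List.foldl_cons]
    by_cases hp : p z = true
    · rw [hp]
      simp only [if_true, PySem.Dict.getD, pvFD_get? p z hp, ← pvFD_insert_pos p z hp]
      exact ih _
    · rw [Bool.not_eq_true] at hp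
      simp only [hp, Bool.false_eq_true, if_false]
      rw [← pvFD_insert_neg p z hp tc (tc.getD z [] ++ [c])]
      exact ih _

theorem pv_outer_comm (p : String → Bool) (ct : List (String × List String))
    (tc : PySem.Dict String (List String)) :
    ct.foldl (fun r q => pvPolyB p q.1 r q.2) (pvFD p tc)
      = pvFD p (ct.foldl (fun t q => pvTCInner q.1 t q.2) tc) := by
  induction ct generalizing tc with
  | nil => rfl
  | cons q ct ih =>
    simp only [List.foldl_cons, pv_inner_comm p q.1 q.2 tc]
    exact ih _

theorem pv_counts_inner (zs : List String) (country : String)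
    (c : PySem.Dict String Int) (tc : PySem.Dict String (List String))
    (H : ∀ z, c.getD z 0 = ((tc.getD z []).length : Int)) :
    ∀ z, (pvCountsInner c zs).getD z 0 = (((pvTCInner country tc zs).getD z []).length : Int) := by
  induction zs generalizing c tc with
  | nil => exact H
  | cons z0 zs ih =>
    simp only [pvCountsInner, pvTCInner, List.foldl_cons]
    refine ih _ _ (fun z => ?_)
    rw [PySem.Dict.getD_insert, PySem.Dict.getD_insert]
    by_cases hz : z = z0
    · simp [hz, H z0]
    · simp [hz, H z]

theorem pv_counts_outer (ct : List (String × List String))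
    (c : PySem.Dict String Int) (tc : PySem.Dict String (List String))
    (H : ∀ z, c.getD z 0 = ((tc.getD z []).length : Int)) :
    ∀ z, (ct.foldl (fun c q => pvCountsInner c q.2) c).getD z 0
      = (((ct.foldl (fun t q => pvTCInner q.1 t q.2) tc).getD z []).length : Int) := by
  induction ct generalizing c tc with
  | nil => exact H
  | cons q ct ih =>
    simp only [List.foldl_cons]
    exact ih _ _ (pv_counts_inner q.2 q.1 c tc H)

theorem pv_nodup_tc (ct : List (String × List String)) (tc : PySem.Dict String (List String))
    (h : tc.keys.Nodup) : (ct.foldl (fun t q => pvTCInner q.1 t q.2) tc).keys.Nodup := by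
  induction ct generalizing tc with
  | nil => exact h
  | cons q ct ih =>
    simp only [List.foldl_cons]
    exact ih _ (PySem.Dict.nodup_keys_foldl_insert q.2 (fun d x => d.getD x [] ++ [q.1]) tc h)

-- ===== VERDICT (by name: the statement is the Claim_ definition above) =====
theorem get_poly_timezones_spec : Claim_equal_get_poly_timezones := by
  intro ct _
  show (ct.foldl (fun tc q => pvTCInner q.1 tc q.2) PySem.Dict.empty).items.filter
        (fun kv => decide (1 < kv.2.length))
      = (ct.foldl
          (fun r q => pvPolyInner (ct.foldl (fun c q => pvCountsInner c q.2) PySem.Dict.empty) q.1 r q.2)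
          PySem.Dict.empty).items
  set counts := ct.foldl (fun c q => pvCountsInner c q.2) PySem.Dict.empty with hcounts
  set p : String → Bool := fun z => decide (1 < counts.getD z 0) with hp
  have hfun : (fun r (q : String × List String) => pvPolyInner counts q.1 r q.2)
      = (fun r q => pvPolyB p q.1 r q.2) := by
    funext r q
    exact pvPolyInner_eq_pvPolyB counts q.1 r q.2
  rw [hfun]
  have hempty : (PySem.Dict.empty : PySem.Dict String (List String)) = pvFD p PySem.Dict.empty := rfl
  rw [hempty, pv_outer_comm p ct PySem.Dict.empty]
  set tcf := ct.foldl (fun t q => pvTCInner q.1 t q.2) (PySem.Dict.empty : PySem.Dict String (List String)) with htcf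
  show tcf.items.filter (fun kv => decide (1 < kv.2.length)) = (pvFD p tcf).items
  have hnodup : tcf.keys.Nodup := pv_nodup_tc ct PySem.Dict.empty PySem.Dict.nodup_keys_empty
  have hcnt : ∀ z, counts.getD z 0 = ((tcf.getD z []).length : Int) :=
    pv_counts_outer ct PySem.Dict.empty PySem.Dict.empty (fun z => by simp [PySem.Dict.getD_empty])
  refine List.filter_congr (fun kv hmem => ?_)
  obtain ⟨k, v⟩ := kv
  have hv : tcf.getD k [] = v := PySem.Dict.getD_of_mem_items tcf hmem hnodup []
  simp only [hp, hcnt k, hv]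
  simp
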